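-- pv_equiv track=rewrite | github.com/loqz99156/pandoc_to_markdown | src/pandoc_to_markdown/markdown_postprocess.py | _trim_edges
-- ===== SOURCE A (Python) =====
-- def _trim_edges(lines: list[str]) -> list[str]:
--     start = 0
--     end = len(lines)
--     while start < end and lines[start] == "":
--         start += 1
--     while end > start and lines[end - 1] == "":
--         end -= 1
--     return lines[start:end]
-- ===== SOURCE B (Python) =====
-- def _drop_empty_prefix(xs):
--     if xs and xs[0] == "":
--         return _drop_empty_prefix(xs[1:])
--     return xs
--
--
-- def _trim_edges(lines: list[str]) -> list[str]:
--     front = _drop_empty_prefix(list(lines))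
--     back = _drop_empty_prefix(front[::-1])
--     return back[::-1]
-- ===== Notes on version B (the rewrite author's own statement) =====
-- stated objective: simpler
-- what changed: Replaces the two index-pointer while loops and a slice by structural recursion that drops the empty prefix, applied once to the list and once to its reverse (reverse-twice idiom); no indices are maintained.
import Mathlib
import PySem

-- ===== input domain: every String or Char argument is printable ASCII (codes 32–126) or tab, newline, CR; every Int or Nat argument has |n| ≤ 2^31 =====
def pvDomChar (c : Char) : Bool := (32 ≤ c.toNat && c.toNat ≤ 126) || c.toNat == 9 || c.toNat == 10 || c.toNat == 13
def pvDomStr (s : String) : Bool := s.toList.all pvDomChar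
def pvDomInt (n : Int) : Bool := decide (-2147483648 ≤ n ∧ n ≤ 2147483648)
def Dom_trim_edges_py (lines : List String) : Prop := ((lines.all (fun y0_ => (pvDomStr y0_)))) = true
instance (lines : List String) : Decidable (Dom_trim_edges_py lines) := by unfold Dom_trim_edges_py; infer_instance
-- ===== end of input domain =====

-- B replaces A's two index-pointer while loops and slice by a structural "drop empty prefix"
-- recursion applied to the list and to its reverse (reverse-twice idiom); objective: simpler.

-- ===== PORT A =====
-- first while loop: advance start past leading "" entries (index is in range when the guard holds)
def trimStartLoop (lines : List String) (e s : Nat) : Nat :=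
  if _h : s < e && (lines.getD s "" == "") then trimStartLoop lines e (s + 1) else s
termination_by e - s
decreasing_by simp at _h; omega

-- second while loop: retract end past trailing "" entries
def trimEndLoop (lines : List String) (s e : Nat) : Nat :=
  if _h : s < e && (lines.getD (e - 1) "" == "") then trimEndLoop lines s (e - 1) else e
termination_by e - s
decreasing_by simp at _h; omega

def trim_edges_py (lines : List String) : List String :=
  let start := trimStartLoop lines lines.length 0
  let e := trimEndLoop lines start lines.length
  PySem.List.slice lines (some (start : Int)) (some (e : Int))

-- ===== PORT B =====
-- recursion of Source B's _drop_empty_prefix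
def dropEmptyPrefix : List String → List String
  | [] => []
  | x :: xs => if x == "" then dropEmptyPrefix xs else x :: xs

def trim_edges_py_alt (lines : List String) : List String :=
  let front := dropEmptyPrefix lines
  let back := dropEmptyPrefix front.reverse   -- front[::-1]
  back.reverse

-- ===== PRECONDITION & SPEC =====
def Spec_trim_edges_py (lines : List String) (out : List String) : Prop := out = trim_edges_py_alt lines
instance (lines : List String) (out : List String) : Decidable (Spec_trim_edges_py lines out) := by unfold Spec_trim_edges_py; infer_instance

-- ===== CLAIM (what is proved, stated in full; the proofs are below) =====
def Claim_equal_trim_edges_py : Prop := ∀ (lines : List String), Dom_trim_edges_py lines → Spec_trim_edges_py lines (trim_edges_py lines)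

-- ===== LEMMAS AND PROOFS =====

lemma dropEmptyPrefix_eq_dropWhile (xs : List String) :
    dropEmptyPrefix xs = xs.dropWhile (· == "") := by
  induction xs with
  | nil => rfl
  | cons x xs ih => simp [dropEmptyPrefix, List.dropWhile_cons, ih]

lemma drop_length_takeWhile (p : String → Bool) (l : List String) :
    l.drop (l.takeWhile p).length = l.dropWhile p := by
  induction l with
  | nil => rfl
  | cons x xs ih => by_cases h : p x <;> simp [h, ih]

lemma trimStartLoop_spec (lines : List String) :
    ∀ s, s ≤ lines.length →
      trimStartLoop lines lines.length s = s + ((lines.drop s).takeWhile (· == "")).length := by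
  suffices H : ∀ n s, lines.length - s = n → s ≤ lines.length →
      trimStartLoop lines lines.length s = s + ((lines.drop s).takeWhile (· == "")).length by
    intro s hs; exact H (lines.length - s) s rfl hs
  intro n
  induction n with
  | zero =>
    intro s hn hs
    have hse : s = lines.length := by omega
    rw [trimStartLoop]
    simp [hse]
  | succ n ih =>
    intro s hn hs
    have hlt : s < lines.length := by omega
    have hget : lines.getD s "" = lines[s] := List.getD_eq_getElem lines "" hlt
    have hdrop : lines.drop s = lines[s] :: lines.drop (s + 1) :=
      List.drop_eq_getElem_cons hlt
    rw [trimStartLoop]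
    by_cases h : lines[s] == ""
    · have hTW : (lines.drop s).takeWhile (· == "")
          = lines[s] :: ((lines.drop (s + 1)).takeWhile (· == "")) := by
        rw [hdrop, List.takeWhile_cons]; simp [h]
      simp only [hget, hlt, h, decide_true, Bool.and_true, dif_pos]
      rw [ih (s + 1) (by omega) (by omega), hTW]
      simp; omega
    · have hTW : (lines.drop s).takeWhile (· == "" : String → Bool) = [] := by
        rw [hdrop, List.takeWhile_cons]; simp [h]
      simp only [hget, h, Bool.and_false, dif_neg, Bool.false_eq_true, not_false_iff]
      rw [hTW]
      simp

lemma trimEndLoop_spec (lines : List String) (s : Nat) :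
    ∀ e, s ≤ e → e ≤ lines.length →
      trimEndLoop lines s e = e - ((((lines.take e).drop s)).reverse.takeWhile (· == "")).length := by
  suffices H : ∀ n e, e - s = n → s ≤ e → e ≤ lines.length →
      trimEndLoop lines s e = e - ((((lines.take e).drop s)).reverse.takeWhile (· == "")).length by
    intro e hse he; exact H (e - s) e rfl hse he
  intro n
  induction n with
  | zero =>
    intro e hn hse he
    have hes : e = s := by omega
    subst hes
    rw [trimEndLoop]
    have hnil : (lines.take e).drop e = [] :=
      List.drop_eq_nil_of_le (by simp)
    simp [hnil]
  | succ n ih =>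
    intro e hn hse he
    obtain ⟨m, rfl⟩ : ∃ m, e = m + 1 := ⟨e - 1, by omega⟩
    have hlt : s < m + 1 := by omega
    have he1 : m < lines.length := by omega
    have hm : m + 1 - 1 = m := by omega
    have hget : lines.getD m "" = lines[m] := List.getD_eq_getElem lines "" he1
    have hseg : (lines.take (m + 1)).drop s = (lines.take m).drop s ++ [lines[m]] := by
      rw [List.take_succ_eq_append_getElem he1, List.drop_append_of_le_length]
      simp; omega
    have hRev : ((lines.take (m + 1)).drop s).reverse
        = lines[m] :: ((lines.take m).drop s).reverse := by
      rw [hseg]; simp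
    rw [trimEndLoop]
    by_cases h : lines[m] == ""
    · have hTW : (((lines.take (m + 1)).drop s).reverse).takeWhile (· == "")
          = lines[m] :: ((((lines.take m).drop s).reverse).takeWhile (· == "")) := by
        rw [hRev, List.takeWhile_cons]; simp [h]
      simp only [hm, hget, hlt, h, decide_true, Bool.and_true, dif_pos]
      rw [ih m (by omega) (by omega) (by omega), hTW]
      have hle : ((((lines.take m).drop s).reverse).takeWhile (· == "" : String → Bool)).length
          ≤ m - s := by
        have := (List.takeWhile_prefix (l := ((lines.take m).drop s).reverse)
          (p := (· == "" : String → Bool))).length_le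
        simp at this
        omega
      simp only [List.length_cons]
      omega
    · have hTW : (((lines.take (m + 1)).drop s).reverse).takeWhile (· == "" : String → Bool)
          = [] := by
        rw [hRev, List.takeWhile_cons]; simp [h]
      simp only [hm, hget, h, Bool.and_false, dif_neg, Bool.false_eq_true, not_false_iff]
      rw [hTW]
      simp

-- ===== VERDICT (by name: the statement is the Claim_ definition above) =====
theorem trim_edges_py_spec : Claim_equal_trim_edges_py := by
  intro lines _
  unfold Spec_trim_edges_py trim_edges_py trim_edges_py_alt
  have hstart : trimStartLoop lines lines.length 0 = (lines.takeWhile (· == "")).length := by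
    rw [trimStartLoop_spec lines 0 (Nat.zero_le _)]; simp
  set s0 := (lines.takeWhile (· == "" : String → Bool)).length with hs0def
  have hs0 : s0 ≤ lines.length :=
    (List.takeWhile_prefix (l := lines) (p := (· == "" : String → Bool))).length_le
  set b := lines.drop s0 with hbdef
  have hend : trimEndLoop lines s0 lines.length
      = lines.length - (b.reverse.takeWhile (· == "")).length := by
    rw [trimEndLoop_spec lines s0 lines.length hs0 (Nat.le_refl _)]
    simp [hbdef]
  set t := (b.reverse.takeWhile (· == "" : String → Bool)).length with htdef
  have hblen : b.length = lines.length - s0 := by simp [hbdef]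
  have hfront : dropEmptyPrefix lines = b := by
    rw [dropEmptyPrefix_eq_dropWhile, hbdef, hs0def, drop_length_takeWhile]
  have hback : dropEmptyPrefix b.reverse = b.reverse.drop t := by
    rw [dropEmptyPrefix_eq_dropWhile, htdef, drop_length_takeWhile]
  simp only [hstart, hend, hfront, hback]
  rw [PySem.List.slice_natCast, List.reverse_drop]
  simp only [List.reverse_reverse, List.length_reverse]
  congr 1
  omega
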